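-- pv_equiv track=rewrite | github.com/NOAA-GSL/zyra | src/zyra/transform/raster.py | _auto_overview_levels
-- ===== SOURCE A (Python) =====
-- def _auto_overview_levels(width: int, height: int) -> tuple[int, ...]:
--     levels: list[int] = []
--     max_dim = max(width, height)
--     factor = 2
--     while max_dim / factor > 256 and factor <= 512:
--         levels.append(factor)
--         factor *= 2
--     return tuple(levels)
-- ===== SOURCE B (Python) =====
-- def _auto_overview_levels(width: int, height: int) -> tuple[int, ...]:
--     m = max(width, height)
--     if m <= 512:
--         return ()
--     # largest e with 2**e < m is bit_length(m-1)-1; factor 2**k included iff m > 2**(8+k), k capped at 9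
--     count = min(9, (m - 1).bit_length() - 9)
--     return tuple(2 ** k for k in range(1, count + 1))
-- ===== Notes on version B (the rewrite author's own statement) =====
-- stated objective: simpler
-- what changed: Replaces the doubling while-loop accumulation by a closed-form level count derived from (max_dim-1).bit_length(), generating the powers of two directly.
import Mathlib
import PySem

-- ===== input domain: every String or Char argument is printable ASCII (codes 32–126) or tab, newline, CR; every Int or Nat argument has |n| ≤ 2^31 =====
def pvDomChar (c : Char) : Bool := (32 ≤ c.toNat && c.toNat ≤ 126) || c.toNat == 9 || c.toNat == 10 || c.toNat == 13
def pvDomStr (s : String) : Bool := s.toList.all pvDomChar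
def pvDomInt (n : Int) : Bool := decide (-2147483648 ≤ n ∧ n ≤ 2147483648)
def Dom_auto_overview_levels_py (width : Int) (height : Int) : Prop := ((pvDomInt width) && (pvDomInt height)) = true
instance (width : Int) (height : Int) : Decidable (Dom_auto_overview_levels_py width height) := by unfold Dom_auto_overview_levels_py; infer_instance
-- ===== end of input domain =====

-- B replaces A's doubling while-loop by a closed-form level count from bit_length (objective: simpler / loop-free; no speed claim).

-- ===== PORT A =====
-- Python's `while` loop; fuel 10 is enough since factor doubles from 2 and the loop stops once factor > 512
-- (9 iterations at most); the guard `256 * factor < max_dim` is exact for Python's float test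
-- `max_dim / factor > 256` because |max_dim| ≤ 2^31 and factor is a power of two, so the division is exact.
def pvLoopA (fuel : Nat) (max_dim : Int) (factor : Int) (levels : List Int) : List Int :=
  if fuel = 0 then levels
  else if 256 * factor < max_dim ∧ factor ≤ 512 then
    pvLoopA (fuel - 1) max_dim (factor * 2) (levels ++ [factor])
  else levels

def auto_overview_levels_py (width : Int) (height : Int) : List Int :=
  pvLoopA 10 (max width height) 2 []

-- ===== PORT B =====
-- body of Source B after computing m = max(width, height); `(m-1).bit_length()` = Nat.log2 (m-1).toNat + 1,
-- exact here since the branch guarantees m - 1 >= 512 > 0.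
def pvAltBody (m : Int) : List Int :=
  if m ≤ 512 then []
  else
    (PySem.List.pyRange 1 (min 9 (((Nat.log2 (m - 1).toNat : Int) + 1) - 9) + 1) 1).map
      (fun k => (2 : Int) ^ k.toNat)

def auto_overview_levels_py_alt (width : Int) (height : Int) : List Int :=
  pvAltBody (max width height)

-- ===== PRECONDITION & SPEC =====
def Spec_auto_overview_levels_py (width : Int) (height : Int) (out : List Int) : Prop := out = auto_overview_levels_py_alt width height
instance (width : Int) (height : Int) (out : List Int) : Decidable (Spec_auto_overview_levels_py width height out) := by unfold Spec_auto_overview_levels_py; infer_instance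

-- ===== CLAIM (what is proved, stated in full; the proofs are below) =====
def Claim_equal_auto_overview_levels_py : Prop := ∀ (width : Int) (height : Int), Dom_auto_overview_levels_py width height → Spec_auto_overview_levels_py width height (auto_overview_levels_py width height)

-- ===== LEMMAS AND PROOFS =====

theorem pvLog2_eq (n k : Nat) (h1 : 2 ^ k ≤ n) (h2 : n < 2 ^ (k + 1)) : Nat.log2 n = k := by
  have hn : n ≠ 0 := by
    have : 1 ≤ 2 ^ k := Nat.one_le_two_pow
    omega
  have hl := (Nat.le_log2 hn).mpr h1
  have hu := (Nat.log2_lt hn).mpr h2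
  omega

theorem pvLoopA_pos (fuel : Nat) (m f : Int) (lv : List Int) (hf : fuel ≠ 0)
    (h1 : 256 * f < m) (h2 : f ≤ 512) :
    pvLoopA fuel m f lv = pvLoopA (fuel - 1) m (f * 2) (lv ++ [f]) := by
  rw [pvLoopA]
  simp [hf, h1, h2]

theorem pvLoopA_stop (fuel : Nat) (m f : Int) (lv : List Int)
    (h : ¬(256 * f < m ∧ f ≤ 512)) :
    pvLoopA fuel m f lv = lv := by
  rw [pvLoopA]
  simp [h]

theorem pvMain (m : Int) : pvLoopA 10 m 2 [] = pvAltBody m := by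
  by_cases h0 : m ≤ 512
  · simp only [pvAltBody]
    rw [if_pos h0, pvLoopA_stop _ _ _ _ (by omega)]
  by_cases hk1 : m ≤ 1024
  · have hlog : Nat.log2 (m - 1).toNat = 9 :=
      pvLog2_eq _ 9 (by norm_num; omega) (by norm_num; omega)
    simp only [pvAltBody]
    rw [if_neg (by omega), hlog]
    rw [pvLoopA_pos, pvLoopA_stop]
    · decide
    all_goals omega
  by_cases hk2 : m ≤ 2048
  · have hlog : Nat.log2 (m - 1).toNat = 10 :=
      pvLog2_eq _ 10 (by norm_num; omega) (by norm_num; omega)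
    simp only [pvAltBody]
    rw [if_neg (by omega), hlog]
    rw [pvLoopA_pos, pvLoopA_pos, pvLoopA_stop]
    · decide
    all_goals omega
  by_cases hk3 : m ≤ 4096
  · have hlog : Nat.log2 (m - 1).toNat = 11 :=
      pvLog2_eq _ 11 (by norm_num; omega) (by norm_num; omega)
    simp only [pvAltBody]
    rw [if_neg (by omega), hlog]
    rw [pvLoopA_pos, pvLoopA_pos, pvLoopA_pos, pvLoopA_stop]
    · decide
    all_goals omega
  by_cases hk4 : m ≤ 8192
  · have hlog : Nat.log2 (m - 1).toNat = 12 :=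
      pvLog2_eq _ 12 (by norm_num; omega) (by norm_num; omega)
    simp only [pvAltBody]
    rw [if_neg (by omega), hlog]
    rw [pvLoopA_pos, pvLoopA_pos, pvLoopA_pos, pvLoopA_pos, pvLoopA_stop]
    · decide
    all_goals omega
  by_cases hk5 : m ≤ 16384
  · have hlog : Nat.log2 (m - 1).toNat = 13 :=
      pvLog2_eq _ 13 (by norm_num; omega) (by norm_num; omega)
    simp only [pvAltBody]
    rw [if_neg (by omega), hlog]
    rw [pvLoopA_pos, pvLoopA_pos, pvLoopA_pos, pvLoopA_pos, pvLoopA_pos, pvLoopA_stop]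
    · decide
    all_goals omega
  by_cases hk6 : m ≤ 32768
  · have hlog : Nat.log2 (m - 1).toNat = 14 :=
      pvLog2_eq _ 14 (by norm_num; omega) (by norm_num; omega)
    simp only [pvAltBody]
    rw [if_neg (by omega), hlog]
    rw [pvLoopA_pos, pvLoopA_pos, pvLoopA_pos, pvLoopA_pos, pvLoopA_pos, pvLoopA_pos, pvLoopA_stop]
    · decide
    all_goals omega
  by_cases hk7 : m ≤ 65536
  · have hlog : Nat.log2 (m - 1).toNat = 15 :=
      pvLog2_eq _ 15 (by norm_num; omega) (by norm_num; omega)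
    simp only [pvAltBody]
    rw [if_neg (by omega), hlog]
    rw [pvLoopA_pos, pvLoopA_pos, pvLoopA_pos, pvLoopA_pos, pvLoopA_pos, pvLoopA_pos, pvLoopA_pos, pvLoopA_stop]
    · decide
    all_goals omega
  by_cases hk8 : m ≤ 131072
  · have hlog : Nat.log2 (m - 1).toNat = 16 :=
      pvLog2_eq _ 16 (by norm_num; omega) (by norm_num; omega)
    simp only [pvAltBody]
    rw [if_neg (by omega), hlog]
    rw [pvLoopA_pos, pvLoopA_pos, pvLoopA_pos, pvLoopA_pos, pvLoopA_pos, pvLoopA_pos, pvLoopA_pos, pvLoopA_pos, pvLoopA_stop]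
    · decide
    all_goals omega
  · -- 131072 < m : all nine levels; the factor <= 512 cap in A and the min 9 cap in B both bite
    have h17 : 17 ≤ Nat.log2 (m - 1).toNat :=
      (Nat.le_log2 (by omega)).mpr (by norm_num; omega)
    have h17' : (17 : Int) ≤ (Nat.log2 (m - 1).toNat : Int) := by exact_mod_cast h17
    simp only [pvAltBody]
    rw [if_neg (by omega),
      show (min 9 (((Nat.log2 (m - 1).toNat : Int) + 1) - 9)) = 9 from by omega]
    rw [pvLoopA_pos, pvLoopA_pos, pvLoopA_pos, pvLoopA_pos, pvLoopA_pos, pvLoopA_pos, pvLoopA_pos, pvLoopA_pos, pvLoopA_pos, pvLoopA_stop]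
    · decide
    all_goals omega

-- ===== VERDICT (by name: the statement is the Claim_ definition above) =====
theorem auto_overview_levels_py_spec : Claim_equal_auto_overview_levels_py := by
  intro width height _
  unfold Spec_auto_overview_levels_py auto_overview_levels_py auto_overview_levels_py_alt
  exact pvMain (max width height)
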